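-- pv_equiv track=rewrite | github.com/jareducherek/lc-problems | problems/3355.py | zero_array_transformation
-- ===== SOURCE A (Python) =====
-- from typing import List
--
-- def zero_array_transformation(l: List[int], q: List[List[int]]) -> int:
--     n = len(l)
--     cs = [0]*(n+1)
--     for a, b in q:
--         cs[a] += 1
--         cs[b+1] -= 1
--     val = 0
--     for i in range(n):
--         val += cs[i]
--         if l[i] - val > 0:
--             return False
--     return True
-- ===== SOURCE B (Python) =====
-- from typing import List
--
-- def zero_array_transformation(l: List[int], q: List[List[int]]) -> int:
--     for i, x in enumerate(l):
--         if x > sum(1 for a, b in q if a <= i <= b):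
--             return False
--     return True
-- ===== Notes on version B (the rewrite author's own statement) =====
-- stated objective: simpler
-- what changed: Replaces the difference-array prefix-sum sweep with a direct per-index count: for each index i it counts the queries covering i and compares, keeping no state across iterations.
-- outside the precondition, e.g. on zero_array_transformation([0, 0, -1], [[2, 0]]): A returns False, B returns True
import Mathlib
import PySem

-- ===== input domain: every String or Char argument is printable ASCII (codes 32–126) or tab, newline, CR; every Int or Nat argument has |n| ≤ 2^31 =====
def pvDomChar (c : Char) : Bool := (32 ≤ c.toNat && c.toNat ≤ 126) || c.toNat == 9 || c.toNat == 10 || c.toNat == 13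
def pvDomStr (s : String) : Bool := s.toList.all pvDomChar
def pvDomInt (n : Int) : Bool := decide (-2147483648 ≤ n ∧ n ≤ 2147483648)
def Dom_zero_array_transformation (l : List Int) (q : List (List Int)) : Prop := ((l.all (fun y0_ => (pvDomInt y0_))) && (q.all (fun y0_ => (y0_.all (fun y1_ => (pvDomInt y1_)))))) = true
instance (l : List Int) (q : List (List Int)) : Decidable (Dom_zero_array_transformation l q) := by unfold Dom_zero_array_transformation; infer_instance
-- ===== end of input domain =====

-- B drops the difference array: per index i it counts the queries covering i directly (simpler, no state across iterations).

-- ===== PORT A =====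
-- cs[i] += d  (Python semantics: negative i wraps; out of range is IndexError, excluded by Pre_)
def pvBump (cs : List Int) (i : Int) (d : Int) : List Int :=
  PySem.List.pySetD cs i (PySem.List.pyGetD cs i 0 + d)

-- for a, b in q: cs[a] += 1; cs[b+1] -= 1
def pvApply (cs : List Int) (ab : List Int) : List Int :=
  match ab with
  | [a, b] => pvBump (pvBump cs a 1) (b + 1) (-1)
  | _ => cs

-- for i in range(n): val += cs[i]; if l[i] - val > 0: return False
def pvALoop : List Int → List Int → Int → Bool
  | [], _, _ => true
  | x :: xs, c :: cs, val =>
      let val' := val + c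
      if x - val' > 0 then false else pvALoop xs cs val'
  | _ :: _, [], _ => true  -- unreachable: cs is one longer than l

def zero_array_transformation (l : List Int) (q : List (List Int)) : Bool :=
  let n := l.length
  let cs := q.foldl pvApply (List.replicate (n + 1) 0)
  pvALoop l cs 0

-- ===== PORT B =====
-- sum(1 for a, b in q if a <= i <= b)
def pvCount (q : List (List Int)) (i : Int) : Int :=
  q.foldl (fun s ab =>
    match ab with
    | [a, b] => if a ≤ i ∧ i ≤ b then s + 1 else s
    | _ => s) 0

def pvBLoop (q : List (List Int)) : List Int → Int → Bool
  | [], _ => true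
  | x :: xs, i => if x > pvCount q i then false else pvBLoop q xs (i + 1)

def zero_array_transformation_alt (l : List Int) (q : List (List Int)) : Bool :=
  pvBLoop q l 0

-- ===== PRECONDITION & SPEC =====
-- a prefix of elements ≤ -len(q) (on which no admissible decrement can leave a positive residue)
-- followed by one element > len(q) (which no decrement can clear): both programs must answer False
def pvForcedB (Q : Int) : List Int → Bool
  | [] => false
  | x :: xs => Q < x || (decide (x ≤ -Q) && pvForcedB Q xs)

-- Pre_ admits the inputs on which the two programs provably compute the same thing: every query is a
-- well-formed pair [a, b] within the index range A accepts (so A does not raise), and EITHER every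
-- query's effect is the same range decrement in both programs — a valid range 0 <= a <= b, an empty
-- range whose +1/-1 land on the same difference-array cell and cancel (a = b+1, its wrapped variants
-- a = b+n+2 and [n, -2]), or the wrapped whole-array start a = -(n+1) — OR the outcome is forced by
-- the values of l alone whatever the queries do: a ≤ -len(q) prefix followed by an element > len(q)
-- (both return False), or every element ≤ -len(q) (both return True).  It excludes queries on which A
-- raises IndexError/ValueError, and remaining malformed queries (a > b + 1, stray negative endpoints)
-- on which A still returns but the returned value is crosstalk of Python's negative-index wraparound
-- in the difference array — input no caller of this range-decrement problem supplies (on many such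
-- inputs the two programs still happen to return the same Bool, but their per-index counts differ).
def Pre_zero_array_transformation (l : List Int) (q : List (List Int)) : Prop :=
  (∀ ab ∈ q, ab.length = 2 ∧
    -(l.length : Int) - 1 ≤ ab.getD 0 0 ∧ ab.getD 0 0 ≤ (l.length : Int) ∧
    -(l.length : Int) - 1 ≤ ab.getD 1 0 + 1 ∧ ab.getD 1 0 + 1 ≤ (l.length : Int)) ∧
  ((∀ ab ∈ q,
     (0 ≤ ab.getD 0 0 ∧ ab.getD 0 0 ≤ ab.getD 1 0) ∨
     ab.getD 0 0 = ab.getD 1 0 + 1 ∨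
     (0 ≤ ab.getD 0 0 ∧ ab.getD 1 0 + 1 < 0 ∧ ab.getD 0 0 = ab.getD 1 0 + (l.length : Int) + 2) ∨
     (ab.getD 0 0 = (l.length : Int) ∧ ab.getD 1 0 = -2) ∨
     (ab.getD 0 0 = -(l.length : Int) - 1 ∧ -1 ≤ ab.getD 1 0)) ∨
   pvForcedB (q.length : Int) l = true ∨
   (∀ x ∈ l, x ≤ -(q.length : Int)))
instance (l : List Int) (q : List (List Int)) : Decidable (Pre_zero_array_transformation l q) := by unfold Pre_zero_array_transformation; infer_instance

def pvWitness_zero_array_transformation : List Int × List (List Int) := ([2, 1, 0, 1, 2, 0], [[0, 3], [2, 5]])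

def Spec_zero_array_transformation (l : List Int) (q : List (List Int)) (out : Bool) : Prop := out = zero_array_transformation_alt l q
instance (l : List Int) (q : List (List Int)) (out : Bool) : Decidable (Spec_zero_array_transformation l q out) := by unfold Spec_zero_array_transformation; infer_instance

-- ===== CLAIM (what is proved, stated in full; the proofs are below) =====
def Claim_equal_zero_array_transformation : Prop := ∀ (l : List Int) (q : List (List Int)), Dom_zero_array_transformation l q → Pre_zero_array_transformation l q → Spec_zero_array_transformation l q (zero_array_transformation l q)

-- ===== LEMMAS AND PROOFS =====

-- Python's index resolution for a list of length m (some = the resolved cell, none = IndexError)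
def pvIdx (m : Nat) (i : Int) : Option Nat :=
  if 0 ≤ i then (if i < (m : Int) then some i.toNat else none)
  else (if -(m : Int) ≤ i then some (m - (-i).toNat) else none)

theorem pvBump_eq (cs : List Int) (i d : Int) :
    pvBump cs i d = match pvIdx cs.length i with
      | some r => cs.set r (cs.getD r 0 + d)
      | none => cs := by
  simp only [pvBump, pvIdx, PySem.List.pySetD, PySem.List.pySet?, PySem.List.pyGetD,
    PySem.List.pyGet?, PySem.List.pyIdx?]
  split_ifs with h1 h2 h3 <;> simp [List.getD]

theorem pvIdx_lt (m : Nat) (i : Int) (r : Nat) (h : pvIdx m i = some r) : r < m := by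
  unfold pvIdx at h
  split_ifs at h <;> simp at h <;> omega

theorem pvBump_length (cs : List Int) (i d : Int) : (pvBump cs i d).length = cs.length := by
  rw [pvBump_eq]
  rcases h : pvIdx cs.length i with _ | r <;> simp

theorem pvIdx_nonneg (m : Nat) (i : Int) (h0 : 0 ≤ i) (h1 : i < (m : Int)) :
    pvIdx m i = some i.toNat := by
  unfold pvIdx
  rw [if_pos h0, if_pos h1]

theorem pvIdx_neg_full (m : Nat) : pvIdx (m + 1) (-(m : Int) - 1) = some 0 := by
  unfold pvIdx
  rw [if_neg (by omega), if_pos (by push_cast; omega)]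
  congr 1
  omega

-- prefix sum of the first k entries
def psum (cs : List Int) (k : Nat) : Int := (cs.take k).sum

theorem psum_set (cs : List Int) (j k : Nat) (d : Int) (hj : j < cs.length) :
    psum (cs.set j (cs.getD j 0 + d)) k = psum cs k + (if j < k then d else 0) := by
  induction cs generalizing j k with
  | nil => simp at hj
  | cons c cs ih =>
      cases j with
      | zero =>
          cases k with
          | zero => simp [psum]
          | succ k => simp [psum, List.getD]; ring
      | succ j =>
          cases k with
          | zero => simp [psum]
          | succ k =>
              have := ih j k (by simpa using hj)
              simp only [List.set_cons_succ, List.getD_cons_succ] at *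
              simp [psum] at this ⊢
              omega

theorem psum_pvBump (cs : List Int) (i d : Int) (k r : Nat)
    (hr : pvIdx cs.length i = some r) :
    psum (pvBump cs i d) k = psum cs k + (if r < k then d else 0) := by
  rw [pvBump_eq, hr]
  exact psum_set cs r k d (pvIdx_lt _ _ _ hr)

theorem pvIdx_neg (m : Nat) (i : Int) (h1 : i < 0) (h2 : -(m : Int) ≤ i) :
    pvIdx m i = some (m - (-i).toNat) := by
  unfold pvIdx
  rw [if_neg (by omega), if_pos h2]

-- a query whose +1 and -1 resolve to the same difference-array cell cancels exactly
theorem pvApply_cancel (cs : List Int) (a b : Int)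
    (hab : pvIdx cs.length a = pvIdx cs.length (b + 1)) : pvApply cs [a, b] = cs := by
  rw [pvApply]
  rcases h : pvIdx cs.length a with _ | r
  · rw [pvBump_eq cs a 1, h]
    show pvBump cs (b + 1) (-1) = cs
    rw [pvBump_eq, ← hab, h]
  · have hr : r < cs.length := pvIdx_lt _ _ _ h
    rw [pvBump_eq cs a 1, h]
    show pvBump (cs.set r (cs.getD r 0 + 1)) (b + 1) (-1) = cs
    rw [pvBump_eq]
    have h2 : pvIdx (cs.set r (cs.getD r 0 + 1)).length (b + 1) = some r := by
      rw [List.length_set, ← hab, h]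
    rw [h2]
    show (cs.set r (cs.getD r 0 + 1)).set r ((cs.set r (cs.getD r 0 + 1)).getD r 0 + -1) = cs
    have hgd : cs.getD r 0 = cs[r] := List.getD_eq_getElem _ _ hr
    have hr' : r < (cs.set r (cs[r] + 1)).length := by simpa using hr
    rw [hgd, List.getD_eq_getElem _ _ hr', List.getElem_set_self hr', List.set_set]
    have hv : cs[r] + 1 + -1 = cs[r] := by ring
    rw [hv, List.set_getElem_self hr]

-- one admitted query shifts the prefix sum over [0, j] by exactly its covering indicator
theorem psum_pvApply (cs : List Int) (n : Nat) (hlen : cs.length = n + 1) (a b : Int) (j : Nat)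
    (hj : j < n)
    (h : -(n : Int) - 1 ≤ a ∧ a ≤ (n : Int) ∧ -(n : Int) - 1 ≤ b + 1 ∧ b + 1 ≤ (n : Int) ∧
      ((0 ≤ a ∧ a ≤ b) ∨ a = b + 1 ∨ (0 ≤ a ∧ b + 1 < 0 ∧ a = b + (n : Int) + 2) ∨
       (a = (n : Int) ∧ b = -2) ∨ (a = -(n : Int) - 1 ∧ -1 ≤ b))) :
    psum (pvApply cs [a, b]) (j + 1)
      = psum cs (j + 1) + (if a ≤ (j : Int) ∧ (j : Int) ≤ b then 1 else 0) := by
  obtain ⟨hra, hrb, hrc, hrd, hcase⟩ := h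
  rcases hcase with ⟨ha, hab⟩ | hempty | ⟨ha, hbneg, hwrap⟩ | ⟨hfa, hfb⟩ | ⟨hfa, hfb⟩
  · -- valid range 0 ≤ a ≤ b (< n from b + 1 ≤ n)
    have hia : pvIdx cs.length a = some a.toNat := pvIdx_nonneg _ _ ha (by omega)
    have hib : pvIdx (pvBump cs a 1).length (b + 1) = some (b + 1).toNat := by
      rw [pvBump_length]; exact pvIdx_nonneg _ _ (by omega) (by omega)
    rw [pvApply, psum_pvBump _ _ _ _ _ hib, psum_pvBump _ _ _ _ _ hia]
    have h1 : a.toNat < j + 1 ↔ a ≤ (j : Int) := by omega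
    have h2 : (b + 1).toNat < j + 1 ↔ ¬ ((j : Int) ≤ b) := by omega
    by_cases hc1 : a ≤ (j : Int) <;> by_cases hc2 : (j : Int) ≤ b <;>
      simp [h1, h2, hc1, hc2] <;> omega
  · -- empty range a = b + 1: +1 and -1 land on the same cell and cancel; no index is covered
    subst hempty
    rw [pvApply_cancel cs _ _ rfl, if_neg (by omega : ¬ (b + 1 ≤ (j : Int) ∧ (j : Int) ≤ b))]
    ring
  · -- wrapped empty range a = b + n + 2 with b + 1 < 0: both land on cell a and cancel
    have hia : pvIdx cs.length a = some a.toNat := pvIdx_nonneg _ _ ha (by omega)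
    have hib : pvIdx cs.length (b + 1) = some (cs.length - (-(b + 1)).toNat) := by
      rw [pvIdx_neg _ _ hbneg (by omega)]
    have hcells : pvIdx cs.length a = pvIdx cs.length (b + 1) := by
      rw [hia, hib]; congr 1; omega
    rw [pvApply_cancel cs _ _ hcells, if_neg (by omega : ¬ (a ≤ (j : Int) ∧ (j : Int) ≤ b))]
    ring
  · -- the query [n, -2]: both endpoints resolve to the unread last cell n and cancel
    subst hfa hfb
    have hia : pvIdx cs.length (n : Int) = some n := by
      rw [pvIdx_nonneg _ _ (by omega) (by omega)]; simp
    have hib : pvIdx cs.length ((-2 : Int) + 1) = some n := by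
      rw [show ((-2 : Int) + 1) = -1 by ring, pvIdx_neg _ _ (by omega) (by omega)]
      congr 1; omega
    rw [pvApply_cancel cs _ _ (hia.trans hib.symm),
      if_neg (by omega : ¬ ((n : Int) ≤ (j : Int) ∧ (j : Int) ≤ -2))]
    ring
  · -- wrapped whole-array start a = -(n+1): +1 wraps to cell 0, -1 lands at b + 1 ≥ 0
    subst hfa
    have hia : pvIdx cs.length (-(n : Int) - 1) = some 0 := by rw [hlen]; exact pvIdx_neg_full n
    have hib : pvIdx (pvBump cs (-(n : Int) - 1) 1).length (b + 1) = some (b + 1).toNat := by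
      rw [pvBump_length]; exact pvIdx_nonneg _ _ (by omega) (by omega)
    rw [pvApply, psum_pvBump _ _ _ _ _ hib, psum_pvBump _ _ _ _ _ hia]
    rw [if_pos (by omega : (0 : Nat) < j + 1)]
    have h2 : (b + 1).toNat < j + 1 ↔ ¬ ((j : Int) ≤ b) := by omega
    by_cases hc : (j : Int) ≤ b
    · rw [if_neg (by omega), if_pos (by constructor <;> omega)]; ring
    · rw [if_pos (by omega), if_neg (by omega)]; ring

theorem pvCount_eq_sum (q : List (List Int)) (i : Int) :
    pvCount q i = (q.map (fun ab => match ab with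
      | [a, b] => if a ≤ i ∧ i ≤ b then (1 : Int) else 0
      | _ => 0)).sum := by
  have h : (fun (s : Int) (ab : List Int) => match ab with
      | [a, b] => if a ≤ i ∧ i ≤ b then s + 1 else s
      | _ => s) = (fun s ab => s + match ab with
      | [a, b] => if a ≤ i ∧ i ≤ b then (1 : Int) else 0
      | _ => 0) := by
    funext s ab
    match ab with
    | [] => simp
    | [a] => simp
    | [a, b] =>
        show (if a ≤ i ∧ i ≤ b then s + 1 else s) = s + if a ≤ i ∧ i ≤ b then (1 : Int) else 0
        split_ifs <;> ring
    | a :: b :: c :: t => simp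
  rw [pvCount, h, PySem.List.foldl_add]
  simp

theorem pvCount_cons (q : List (List Int)) (a b i : Int) :
    pvCount ([a, b] :: q) i = (if a ≤ i ∧ i ≤ b then 1 else 0) + pvCount q i := by
  simp [pvCount_eq_sum]

theorem foldl_pvApply_length (q : List (List Int)) (cs : List Int) :
    (q.foldl pvApply cs).length = cs.length := by
  induction q generalizing cs with
  | nil => rfl
  | cons hd tl ih =>
      rw [List.foldl_cons, ih]
      match hd with
      | [] => rfl
      | [a] => rfl
      | [a, b] => simp [pvApply, pvBump_length]
      | a :: b :: c :: t => rfl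

-- the difference array's prefix sums equal B's direct cover counts
theorem psum_foldl (q : List (List Int)) (cs : List Int) (n : Nat)
    (hlen : cs.length = n + 1)
    (hq : ∀ ab ∈ q, ab.length = 2 ∧
      (-(n : Int) - 1 ≤ ab.getD 0 0 ∧ ab.getD 0 0 ≤ (n : Int) ∧
       -(n : Int) - 1 ≤ ab.getD 1 0 + 1 ∧ ab.getD 1 0 + 1 ≤ (n : Int) ∧
       ((0 ≤ ab.getD 0 0 ∧ ab.getD 0 0 ≤ ab.getD 1 0) ∨
        ab.getD 0 0 = ab.getD 1 0 + 1 ∨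
        (0 ≤ ab.getD 0 0 ∧ ab.getD 1 0 + 1 < 0 ∧ ab.getD 0 0 = ab.getD 1 0 + (n : Int) + 2) ∨
        (ab.getD 0 0 = (n : Int) ∧ ab.getD 1 0 = -2) ∨
        (ab.getD 0 0 = -(n : Int) - 1 ∧ -1 ≤ ab.getD 1 0)))) :
    ∀ j : Nat, j < n →
      psum (q.foldl pvApply cs) (j + 1) = psum cs (j + 1) + pvCount q (j : Int) := by
  induction q generalizing cs with
  | nil => intro j hj; simp [pvCount]
  | cons hd tl ih =>
      intro j hj
      obtain ⟨h2, hrest⟩ := hq hd (List.mem_cons_self ..)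
      match hd, h2 with
      | [a, b], _ =>
        simp only [List.getD_cons_zero, List.getD_cons_succ] at hrest
        rw [List.foldl_cons,
            ih (pvApply cs [a, b]) (by simp [pvApply, pvBump_length, hlen])
              (fun ab h => hq ab (List.mem_cons_of_mem _ h)) j hj,
            psum_pvApply cs n hlen a b j hj hrest, pvCount_cons]
        ring

-- the two loops agree when A's running value plus the remaining prefix sums equal B's counts
theorem loop_agree (q : List (List Int)) :
    ∀ (xs cs : List Int) (val : Int) (i : Nat),
      xs.length ≤ cs.length →
      (∀ j : Nat, j < xs.length → val + psum cs (j + 1) = pvCount q ((i : Int) + (j : Int))) →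
      pvALoop xs cs val = pvBLoop q xs (i : Int) := by
  intro xs
  induction xs with
  | nil => intro cs val i _ _; cases cs <;> rfl
  | cons x xs ih =>
      intro cs val i hlen hinv
      match cs with
      | [] => simp at hlen
      | c :: cs =>
          have h0 := hinv 0 (by simp)
          simp [psum] at h0
          have hA : pvALoop (x :: xs) (c :: cs) val
              = if x - (val + c) > 0 then false else pvALoop xs cs (val + c) := rfl
          have hB : pvBLoop q (x :: xs) (i : Int)
              = if x > pvCount q (i : Int) then false else pvBLoop q xs ((i : Int) + 1) := rfl
          rw [hA, hB]
          by_cases hcond : x > pvCount q (i : Int)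
          · rw [if_pos (by omega), if_pos hcond]
          · rw [if_neg (by omega), if_neg hcond]
            have hcast : ((i : Int) + 1) = ((i + 1 : Nat) : Int) := by push_cast; ring
            rw [hcast, ih cs (val + c) (i + 1) (by simpa using hlen)]
            intro j hj
            have := hinv (j + 1) (by simpa using Nat.succ_lt_succ hj)
            simp [psum] at this ⊢
            ring_nf at this ⊢
            omega

-- each query moves any prefix sum by at most one in each direction
theorem psum_pvBump_bound (cs : List Int) (i d : Int) (k : Nat) :
    psum (pvBump cs i d) k = psum cs k ∨ psum (pvBump cs i d) k = psum cs k + d := by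
  rw [pvBump_eq]
  rcases h : pvIdx cs.length i with _ | r
  · left; rfl
  · rw [psum_set cs r k d (pvIdx_lt _ _ _ h)]
    by_cases hrk : r < k
    · right; rw [if_pos hrk]
    · left; rw [if_neg hrk]; ring

theorem psum_pvApply_bound (cs : List Int) (ab : List Int) (k : Nat) :
    psum cs k - 1 ≤ psum (pvApply cs ab) k ∧ psum (pvApply cs ab) k ≤ psum cs k + 1 := by
  match ab with
  | [] => constructor <;> simp [pvApply]
  | [a] => constructor <;> simp [pvApply]
  | [a, b] =>
      rw [pvApply]
      rcases psum_pvBump_bound (pvBump cs a 1) (b + 1) (-1) k with h2 | h2 <;>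
        rcases psum_pvBump_bound cs a 1 k with h1 | h1 <;> rw [h2, h1] <;> constructor <;> omega
  | a :: b :: c :: t => constructor <;> simp [pvApply]

theorem psum_foldl_bound (q : List (List Int)) (cs : List Int) (k : Nat) :
    psum cs k - q.length ≤ psum (q.foldl pvApply cs) k ∧
      psum (q.foldl pvApply cs) k ≤ psum cs k + q.length := by
  induction q generalizing cs with
  | nil => simp
  | cons hd tl ih =>
      rw [List.foldl_cons]
      have h1 := psum_pvApply_bound cs hd k
      have h2 := ih (pvApply cs hd)
      simp only [List.length_cons] at *
      push_cast at *
      omega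

theorem pvCount_bound (q : List (List Int)) (i : Int) :
    0 ≤ pvCount q i ∧ pvCount q i ≤ q.length := by
  rw [pvCount_eq_sum]
  induction q with
  | nil => simp
  | cons hd tl ih =>
      rw [List.map_cons, List.sum_cons]
      have hhd : (0 : Int) ≤ (match hd with
          | [a, b] => if a ≤ i ∧ i ≤ b then (1 : Int) else 0
          | _ => 0) ∧ (match hd with
          | [a, b] => if a ≤ i ∧ i ≤ b then (1 : Int) else 0
          | _ => 0) ≤ 1 := by
        match hd with
        | [] => constructor <;> norm_num
        | [a] => constructor <;> norm_num
        | [a, b] =>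
            show (0 : Int) ≤ (if a ≤ i ∧ i ≤ b then (1 : Int) else 0) ∧
              (if a ≤ i ∧ i ≤ b then (1 : Int) else 0) ≤ 1
            split_ifs <;> omega
        | a :: b :: c :: t => constructor <;> norm_num
      simp only [List.length_cons] at *
      push_cast at *
      omega

-- a forced-False input makes A's loop answer False whatever the difference array holds (within bounds)
theorem aloop_forced (Q : Int) :
    ∀ (xs cs : List Int) (val : Int), xs.length ≤ cs.length →
      (∀ j : Nat, j < xs.length → -Q ≤ val + psum cs (j + 1) ∧ val + psum cs (j + 1) ≤ Q) →
      pvForcedB Q xs = true → pvALoop xs cs val = false := by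
  intro xs
  induction xs with
  | nil => intro cs val _ _ hf; simp [pvForcedB] at hf
  | cons x xs ih =>
      intro cs val hlen hinv hf
      match cs with
      | [] => simp at hlen
      | c :: cs =>
          have h0 := hinv 0 (by simp)
          simp [psum] at h0
          have hA : pvALoop (x :: xs) (c :: cs) val
              = if x - (val + c) > 0 then false else pvALoop xs cs (val + c) := rfl
          rw [hA]
          rcases (by simpa [pvForcedB] using hf :
              Q < x ∨ (x ≤ -Q ∧ pvForcedB Q xs = true)) with hx | ⟨hx1, hx2⟩
          · rw [if_pos (by omega)]
          · rw [if_neg (by omega)]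
            refine ih cs (val + c) (by simpa using hlen) ?_ hx2
            intro j hj
            have := hinv (j + 1) (by simpa using Nat.succ_lt_succ hj)
            simp [psum] at this ⊢
            omega

-- an all-nonpositive-enough input makes A's loop answer True whatever the difference array holds
theorem aloop_allneg (Q : Int) :
    ∀ (xs cs : List Int) (val : Int), xs.length ≤ cs.length →
      (∀ j : Nat, j < xs.length → -Q ≤ val + psum cs (j + 1)) →
      (∀ x ∈ xs, x ≤ -Q) → pvALoop xs cs val = true := by
  intro xs
  induction xs with
  | nil => intro cs val _ _ _; cases cs <;> rfl
  | cons x xs ih =>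
      intro cs val hlen hinv hneg
      match cs with
      | [] => simp at hlen
      | c :: cs =>
          have h0 := hinv 0 (by simp)
          simp [psum] at h0
          have hx := hneg x (List.mem_cons_self ..)
          have hA : pvALoop (x :: xs) (c :: cs) val
              = if x - (val + c) > 0 then false else pvALoop xs cs (val + c) := rfl
          rw [hA, if_neg (by omega)]
          refine ih cs (val + c) (by simpa using hlen) ?_
            (fun y hy => hneg y (List.mem_cons_of_mem _ hy))
          intro j hj
          have := hinv (j + 1) (by simpa using Nat.succ_lt_succ hj)
          simp [psum] at this ⊢
          omega

theorem bloop_forced (q : List (List Int)) :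
    ∀ (xs : List Int) (i : Int), pvForcedB (q.length : Int) xs = true →
      pvBLoop q xs i = false := by
  intro xs
  induction xs with
  | nil => intro i hf; simp [pvForcedB] at hf
  | cons x xs ih =>
      intro i hf
      have hc := pvCount_bound q i
      rcases (by simpa [pvForcedB] using hf :
          (q.length : Int) < x ∨ (x ≤ -(q.length : Int) ∧ pvForcedB (q.length : Int) xs = true)) with
        hx | ⟨hx1, hx2⟩
      · rw [pvBLoop, if_pos (by omega)]
      · rw [pvBLoop, if_neg (by omega)]
        exact ih (i + 1) hx2

theorem bloop_allneg (q : List (List Int)) :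
    ∀ (xs : List Int) (i : Int), (∀ x ∈ xs, x ≤ -(q.length : Int)) →
      pvBLoop q xs i = true := by
  intro xs
  induction xs with
  | nil => intro i _; rfl
  | cons x xs ih =>
      intro i hneg
      have hc := pvCount_bound q i
      have hx := hneg x (List.mem_cons_self ..)
      rw [pvBLoop, if_neg (by omega)]
      exact ih (i + 1) (fun y hy => hneg y (List.mem_cons_of_mem _ hy))

-- ===== VERDICT (by name: the statement is the Claim_ definition above) =====
theorem zero_array_transformation_spec : Claim_equal_zero_array_transformation := by
  intro l q _ hpre
  obtain ⟨hqok, hcase⟩ := hpre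
  unfold Spec_zero_array_transformation zero_array_transformation zero_array_transformation_alt
  show pvALoop l (q.foldl pvApply (List.replicate (l.length + 1) 0)) 0 = pvBLoop q l 0
  have hlen : (List.replicate (l.length + 1) (0 : Int)).length = l.length + 1 := by simp
  have hlenf : (q.foldl pvApply (List.replicate (l.length + 1) (0 : Int))).length = l.length + 1 := by
    rw [foldl_pvApply_length]; simp
  rcases hcase with hpat | hforced | hneg
  · -- every query is the same range decrement on both sides
    have hps := psum_foldl q (List.replicate (l.length + 1) 0) l.length hlen
      (fun ab hab => ⟨(hqok ab hab).1, (hqok ab hab).2.1, (hqok ab hab).2.2.1,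
        (hqok ab hab).2.2.2.1, (hqok ab hab).2.2.2.2, hpat ab hab⟩)
    have h := loop_agree q l (q.foldl pvApply (List.replicate (l.length + 1) 0)) 0 0
      (by omega)
      (by
        intro j hj
        have := hps j hj
        simp [psum, List.take_replicate] at this
        simpa using this)
    simpa using h
  · -- forced False by the values of l alone
    rw [bloop_forced q l 0 hforced]
    refine aloop_forced (q.length : Int) l _ 0 (by omega) ?_ hforced
    intro j hj
    have hb := psum_foldl_bound q (List.replicate (l.length + 1) 0) (j + 1)
    simp [psum, List.take_replicate] at hb ⊢
    omega
  · -- forced True by the values of l alone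
    rw [bloop_allneg q l 0 hneg]
    refine aloop_allneg (q.length : Int) l _ 0 (by omega) ?_ hneg
    intro j hj
    have hb := psum_foldl_bound q (List.replicate (l.length + 1) 0) (j + 1)
    simp [psum, List.take_replicate] at hb ⊢
    omega
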